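-- pv_equiv track=rewrite | github.com/narula2000/advent-of-code-2024 | 10/part-2.py | count_paths_to_trailhead
-- ===== SOURCE A (Python) =====
-- def get_neighbors(x, y, grid):
--     directions = [(0, 1), (1, 0), (0, -1), (-1, 0)]
--     neighbors = []
--     height = len(grid)
--     width = len(grid[0])
--
--     for dx, dy in directions:
--         new_x, new_y = x + dx, y + dy
--         if 0 <= new_x < height and 0 <= new_y < width:
--             neighbors.append((new_x, new_y))
--
--     return neighbors
--
-- def count_paths_to_trailhead(start_x, start_y, grid):
--     memo = {}
--
--     def dfs(row, col, next):
--         if (row, col, next) in memo: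
--             return memo[(row, col, next)]
--
--         if grid[row][col] == 9:
--             return 1
--
--         total_paths = 0
--
--         for next_x, next_y in get_neighbors(row, col, grid):
--             next_height = grid[next_x][next_y]
--             if next_height == next + 1:
--                 total_paths += dfs(next_x, next_y, next_height)
--
--         memo[(row, col, next)] = total_paths
--         return total_paths
--
--     return dfs(start_x, start_y, 0)
-- ===== SOURCE B (Python) =====
-- # Bottom-up DP: build a table of trail counts per cell by descending height,
-- # instead of memoized recursive DFS.
-- DIRS = ((0, 1), (1, 0), (0, -1), (-1, 0))
--
-- def _sum_neighbors(grid, trails, h, w, v, r, c):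
--     s = 0
--     for dr, dc in DIRS:
--         nr, nc = r + dr, c + dc
--         if 0 <= nr < h and 0 <= nc < w and grid[nr][nc] == v + 1:
--             s += trails.get((nr, nc), 0)
--     return s
--
-- def count_paths_to_trailhead(start_x, start_y, grid):
--     h, w = len(grid), len(grid[0])
--     trails = {}
--     for v in range(9, 0, -1):
--         for r in range(h):
--             for c in range(w):
--                 if grid[r][c] == v:
--                     trails[(r, c)] = 1 if v == 9 else _sum_neighbors(grid, trails, h, w, v, r, c)
--     if grid[start_x][start_y] == 9:
--         return 1
--     return _sum_neighbors(grid, trails, h, w, 0, start_x, start_y)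
-- ===== Notes on version B (the rewrite author's own statement) =====
-- stated objective: alternative
-- what changed: Replaces A's memoized top-down recursive DFS (per-start dfs with a memo dict keyed by (row,col,next)) by a bottom-up dynamic-programming table: trail counts are computed for every cell in descending height order (9 down to 1), then the answer is read off at the start cell, preserving A's start quirk of summing height-1 neighbors regardless of the start's own height.
-- outside the precondition, e.g. on count_paths_to_trailhead(0, 0, [[1, 9], [3]]): A returns 0, B raises IndexError
import Mathlib
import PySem

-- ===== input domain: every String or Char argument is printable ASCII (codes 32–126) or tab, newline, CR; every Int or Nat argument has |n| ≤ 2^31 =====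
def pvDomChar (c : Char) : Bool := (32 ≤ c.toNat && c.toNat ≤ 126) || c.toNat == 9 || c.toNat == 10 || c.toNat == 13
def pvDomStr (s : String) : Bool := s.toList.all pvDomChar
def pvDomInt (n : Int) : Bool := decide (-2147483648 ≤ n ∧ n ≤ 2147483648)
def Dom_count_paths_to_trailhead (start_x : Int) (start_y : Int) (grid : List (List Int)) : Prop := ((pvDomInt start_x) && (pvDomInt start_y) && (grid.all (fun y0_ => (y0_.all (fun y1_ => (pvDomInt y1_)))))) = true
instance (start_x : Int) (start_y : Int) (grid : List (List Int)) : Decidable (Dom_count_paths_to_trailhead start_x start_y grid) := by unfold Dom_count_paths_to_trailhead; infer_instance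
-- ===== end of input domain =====

-- ===== PORT A =====
-- B replaces A's memoized top-down DFS by a bottom-up DP table filled per height level
-- (objective: alternative algorithm, same exact return value on Pre_; no argument is mutated).

-- grid[r][c] (Python indexing, negative wrap); total form with default 0 — Pre_ excludes the cases
-- where either Python's indexing raises.
def pyCell (grid : List (List Int)) (r c : Int) : Int :=
  ((PySem.List.pyGet? grid r).bind (fun row => PySem.List.pyGet? row c)).getD 0

-- port of A's get_neighbors (grid[0] → headI; Pre_ has grid nonempty)
def get_neighbors (x : Int) (y : Int) (grid : List (List Int)) : List (Int × Int) :=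
  let directions : List (Int × Int) := [(0, 1), (1, 0), (0, -1), (-1, 0)]
  let height : Int := grid.length
  let width : Int := grid.headI.length
  directions.foldl (fun neighbors d =>
    let nx := x + d.1
    let ny := y + d.2
    if 0 ≤ nx ∧ nx < height ∧ 0 ≤ ny ∧ ny < width then neighbors ++ [(nx, ny)] else neighbors) []

-- A's inner dfs. The memo dict is dropped (pure result caching, value-transparent for the return
-- value) and a fuel argument makes the recursion structural; `next` grows by 1 per recursive call
-- and every chain from next = 0 stops at a height-9 cell, so fuel 10 is never exhausted below.
def dfsA (grid : List (List Int)) : Nat → Int → Int → Int → Int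
  | 0, _, _, _ => 0
  | fuel + 1, row, col, next =>
    if pyCell grid row col = 9 then 1
    else (get_neighbors row col grid).foldl (fun total_paths p =>
      let next_height := pyCell grid p.1 p.2
      if next_height = next + 1 then total_paths + dfsA grid fuel p.1 p.2 next_height
      else total_paths) 0

def count_paths_to_trailhead (start_x : Int) (start_y : Int) (grid : List (List Int)) : Int :=
  dfsA grid 10 start_x start_y 0

-- ===== PORT B =====
-- port of Source B's _sum_neighbors
def bSumNbrs (grid : List (List Int)) (trails : PySem.Dict (Int × Int) Int)
    (h w v r c : Int) : Int :=
  ([(0, 1), (1, 0), (0, -1), (-1, 0)] : List (Int × Int)).foldl (fun s d =>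
    let nr := r + d.1
    let nc := c + d.2
    if 0 ≤ nr ∧ nr < h ∧ 0 ≤ nc ∧ nc < w ∧ pyCell grid nr nc = v + 1 then
      s + trails.getD (nr, nc) 0
    else s) 0

-- one level of Source B's table loop: visit all cells row-major, record those of height v
def bLevel (grid : List (List Int)) (h w v : Int)
    (t0 : PySem.Dict (Int × Int) Int) : PySem.Dict (Int × Int) Int :=
  (PySem.List.pyRange 0 h 1).foldl (fun t1 r =>
    (PySem.List.pyRange 0 w 1).foldl (fun t2 c =>
      if pyCell grid r c = v then
        t2.insert (r, c) (if v = 9 then 1 else bSumNbrs grid t2 h w v r c)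
      else t2) t1) t0

def count_paths_to_trailhead_alt (start_x : Int) (start_y : Int) (grid : List (List Int)) : Int :=
  let h : Int := grid.length
  let w : Int := grid.headI.length
  let trails := (PySem.List.pyRange 9 0 (-1)).foldl (fun t v => bLevel grid h w v t) PySem.Dict.empty
  if pyCell grid start_x start_y = 9 then 1
  else bSumNbrs grid trails h w 0 start_x start_y

-- ===== PRECONDITION & SPEC =====
-- Pre_ is the task's natural domain: a non-empty rectangular grid with at least one column and a
-- start inside Python's (possibly negative) index range. Outside it A raises IndexError — except on
-- some ragged grids where A happens to return because its traversal misses the short rows while B's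
-- full-table scan raises there (one such input is cited in the claim); those are excluded too.
def Pre_count_paths_to_trailhead (start_x : Int) (start_y : Int) (grid : List (List Int)) : Prop :=
  grid ≠ [] ∧ grid.headI ≠ [] ∧ (∀ row ∈ grid, row.length = grid.headI.length) ∧
  PySem.Raise.InRange grid.length start_x ∧ PySem.Raise.InRange grid.headI.length start_y

instance (start_x : Int) (start_y : Int) (grid : List (List Int)) :
    Decidable (Pre_count_paths_to_trailhead start_x start_y grid) := by
  unfold Pre_count_paths_to_trailhead; infer_instance

def pvWitness_count_paths_to_trailhead : Int × Int × List (List Int) := (0, 0, [[0, 1], [2, 9]])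

def Spec_count_paths_to_trailhead (start_x : Int) (start_y : Int) (grid : List (List Int)) (out : Int) : Prop := out = count_paths_to_trailhead_alt start_x start_y grid
instance (start_x : Int) (start_y : Int) (grid : List (List Int)) (out : Int) : Decidable (Spec_count_paths_to_trailhead start_x start_y grid out) := by unfold Spec_count_paths_to_trailhead; infer_instance

-- ===== CLAIM (what is proved, stated in full; the proofs are below) =====
def Claim_equal_count_paths_to_trailhead : Prop := ∀ (start_x : Int) (start_y : Int) (grid : List (List Int)), Dom_count_paths_to_trailhead start_x start_y grid → Pre_count_paths_to_trailhead start_x start_y grid → Spec_count_paths_to_trailhead start_x start_y grid (count_paths_to_trailhead start_x start_y grid)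

-- ===== LEMMAS AND PROOFS =====

lemma nbrSum_aux (grid : List (List Int)) (dict : PySem.Dict (Int × Int) Int) (x y v : Int)
    (f : Int × Int → Int)
    (hft : ∀ a b : Int, 0 ≤ a → a < (grid.length : Int) → 0 ≤ b → b < (grid.headI.length : Int) →
      pyCell grid a b = v + 1 → f (a, b) = dict.getD (a, b) 0) :
    ∀ (L : List (Int × Int)) (n : List (Int × Int)),
      (L.foldl (fun neighbors d =>
          if 0 ≤ x + d.1 ∧ x + d.1 < (grid.length : Int) ∧ 0 ≤ y + d.2 ∧ y + d.2 < (grid.headI.length : Int)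
          then neighbors ++ [(x + d.1, y + d.2)] else neighbors) n).foldl
        (fun total_paths p => if pyCell grid p.1 p.2 = v + 1 then total_paths + f p else total_paths) 0
      = L.foldl (fun s d =>
          if 0 ≤ x + d.1 ∧ x + d.1 < (grid.length : Int) ∧ 0 ≤ y + d.2 ∧ y + d.2 < (grid.headI.length : Int) ∧
              pyCell grid (x + d.1) (y + d.2) = v + 1
          then s + dict.getD (x + d.1, y + d.2) 0 else s)
          (n.foldl (fun total_paths p => if pyCell grid p.1 p.2 = v + 1 then total_paths + f p else total_paths) 0) := by
  intro L
  induction L with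
  | nil => intro n; simp [List.foldl]
  | cons d L ih =>
    intro n
    simp only [List.foldl]
    rw [ih]
    congr 1
    by_cases hb : 0 ≤ x + d.1 ∧ x + d.1 < (grid.length : Int) ∧ 0 ≤ y + d.2 ∧ y + d.2 < (grid.headI.length : Int)
    · rw [if_pos hb, List.foldl_append]
      simp only [List.foldl]
      by_cases hc : pyCell grid (x + d.1) (y + d.2) = v + 1
      · rw [if_pos hc, if_pos ⟨hb.1, hb.2.1, hb.2.2.1, hb.2.2.2, hc⟩,
            hft _ _ hb.1 hb.2.1 hb.2.2.1 hb.2.2.2 hc]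
      · rw [if_neg hc, if_neg (by tauto)]
    · rw [if_neg hb, if_neg (by tauto)]

lemma nbrSum (grid : List (List Int)) (dict : PySem.Dict (Int × Int) Int) (x y v : Int)
    (f : Int × Int → Int)
    (hft : ∀ a b : Int, 0 ≤ a → a < (grid.length : Int) → 0 ≤ b → b < (grid.headI.length : Int) →
      pyCell grid a b = v + 1 → f (a, b) = dict.getD (a, b) 0) :
    (get_neighbors x y grid).foldl (fun total_paths p =>
        if pyCell grid p.1 p.2 = v + 1 then total_paths + f p else total_paths) 0 =
      bSumNbrs grid dict (grid.length : Int) (grid.headI.length : Int) v x y := by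
  have h := nbrSum_aux grid dict x y v f hft [(0, 1), (1, 0), (0, -1), (-1, 0)] []
  simpa [get_neighbors, bSumNbrs] using h

lemma dfsA_succ (grid : List (List Int)) (fuel : Nat) (row col next : Int) :
    dfsA grid (fuel + 1) row col next =
      if pyCell grid row col = 9 then 1
      else (get_neighbors row col grid).foldl (fun total_paths p =>
        if pyCell grid p.1 p.2 = next + 1 then total_paths + dfsA grid fuel p.1 p.2 (pyCell grid p.1 p.2)
        else total_paths) 0 := rfl

lemma dfsA_high (grid : List (List Int)) :
    ∀ (fuel : Nat) (r c next : Int), 10 ≤ next → pyCell grid r c = next →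
      dfsA grid fuel r c next = 0 := by
  intro fuel
  induction fuel with
  | zero => intro r c next _ _; rfl
  | succ fuel ih =>
    intro r c next h10 hcell
    rw [dfsA_succ, if_neg (by omega)]
    rw [PySem.List.foldl_congr_mem _ _ (fun (s : Int) (_ : Int × Int) => s) _ ?_]
    · exact List.foldl_fixed _
    · intro acc p _
      by_cases hc : pyCell grid p.1 p.2 = next + 1
      · rw [if_pos hc, hc, ih p.1 p.2 (next + 1) (by omega) hc, add_zero]
      · rw [if_neg hc]

lemma dfsA_fuel_irrel (grid : List (List Int)) :
    ∀ (fuel₁ fuel₂ : Nat) (r c next : Int), pyCell grid r c = next →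
      10 ≤ (fuel₁ : Int) + next → 10 ≤ (fuel₂ : Int) + next → 1 ≤ fuel₁ → 1 ≤ fuel₂ →
      dfsA grid fuel₁ r c next = dfsA grid fuel₂ r c next := by
  intro fuel₁
  induction fuel₁ with
  | zero => intro _ _ _ _ _ _ _ h1 _; omega
  | succ fuel ih =>
    intro fuel₂ r c next hcell h1 h2 _ hf2
    obtain ⟨f₂, rfl⟩ : ∃ f₂, fuel₂ = f₂ + 1 := ⟨fuel₂ - 1, by omega⟩
    rw [dfsA_succ, dfsA_succ]
    by_cases h9 : pyCell grid r c = 9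
    · rw [if_pos h9, if_pos h9]
    · rw [if_neg h9, if_neg h9]
      rcases Int.lt_or_le next 9 with hlt | hge
      · -- next ≤ 8: recurse with IH
        apply PySem.List.foldl_congr_mem
        intro acc p _
        by_cases hc : pyCell grid p.1 p.2 = next + 1
        · rw [if_pos hc, if_pos hc, hc,
              ih f₂ p.1 p.2 (next + 1) hc (by omega) (by omega)
                (by omega) (by omega)]
        · rw [if_neg hc, if_neg hc]
      · -- next = 9 is excluded by h9+hcell; next ≥ 10: both sides sum zeros
        have h10 : 10 ≤ next := by omega
        have z : ∀ (fl : Nat) (acc : Int) (p : Int × Int),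
            (if pyCell grid p.1 p.2 = next + 1 then acc + dfsA grid fl p.1 p.2 (pyCell grid p.1 p.2) else acc) = acc := by
          intro fl acc p
          by_cases hc : pyCell grid p.1 p.2 = next + 1
          · rw [if_pos hc, hc, dfsA_high grid fl p.1 p.2 (next + 1) (by omega) hc, add_zero]
          · rw [if_neg hc]
        have e : ∀ fl : Nat,
            (get_neighbors r c grid).foldl (fun total_paths p =>
              if pyCell grid p.1 p.2 = next + 1 then total_paths + dfsA grid fl p.1 p.2 (pyCell grid p.1 p.2)
              else total_paths) 0 = 0 := by
          intro fl
          rw [PySem.List.foldl_congr_mem _ _ (fun (s : Int) (_ : Int × Int) => s) _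
              (fun acc p _ => z fl acc p)]
          exact List.foldl_fixed _
        rw [e fuel, e f₂]

def dfsAval (grid : List (List Int)) (r c : Int) : Int := dfsA grid 10 r c (pyCell grid r c)

def TInv (grid : List (List Int)) (u : Int) (t : PySem.Dict (Int × Int) Int) : Prop :=
  ∀ r c : Int, 0 ≤ r → r < (grid.length : Int) → 0 ≤ c → c < (grid.headI.length : Int) →
    u ≤ pyCell grid r c → pyCell grid r c ≤ 9 → t.get? (r, c) = some (dfsAval grid r c)

def cellStep (grid : List (List Int)) (h w v : Int)
    (t : PySem.Dict (Int × Int) Int) (p : Int × Int) : PySem.Dict (Int × Int) Int :=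
  if pyCell grid p.1 p.2 = v then
    t.insert p (if v = 9 then 1 else bSumNbrs grid t h w v p.1 p.2)
  else t

def cells (h w : Int) : List (Int × Int) :=
  (PySem.List.pyRange 0 h 1).flatMap (fun r => (PySem.List.pyRange 0 w 1).map (fun c => (r, c)))

lemma bLevel_eq_foldCells (grid : List (List Int)) (h w v : Int) (t0 : PySem.Dict (Int × Int) Int) :
    bLevel grid h w v t0 = (cells h w).foldl (cellStep grid h w v) t0 := by
  simp only [bLevel, cells, cellStep, List.foldl_flatMap, List.foldl_map]

lemma insert_val (grid : List (List Int)) (v : Int) (t : PySem.Dict (Int × Int) Int)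
    (hv1 : 1 ≤ v) (hv9 : v ≤ 9) (hinv : TInv grid (v + 1) t)
    (r c : Int) (hc : pyCell grid r c = v) :
    (if v = 9 then 1 else bSumNbrs grid t (grid.length : Int) (grid.headI.length : Int) v r c) =
      dfsAval grid r c := by
  unfold dfsAval
  rw [hc]
  by_cases h9 : v = 9
  · rw [if_pos h9, show (10 : Nat) = 9 + 1 from rfl, dfsA_succ, if_pos (by rw [hc, h9])]
  · rw [if_neg h9, show (10 : Nat) = 9 + 1 from rfl, dfsA_succ, if_neg (by rw [hc]; exact h9)]
    rw [nbrSum grid t r c v (fun p => dfsA grid 9 p.1 p.2 (pyCell grid p.1 p.2))]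
    intro a b ha1 ha2 hb1 hb2 hcell
    rw [hcell]
    have hg := hinv a b ha1 ha2 hb1 hb2 (by omega) (by omega)
    rw [PySem.Dict.getD_eq_get?_getD, hg]
    simp only [Option.getD_some]
    unfold dfsAval at *
    rw [hcell] at hg ⊢
    exact dfsA_fuel_irrel grid 9 10 a b (v + 1) hcell (by omega) (by omega) (by omega) (by omega)

lemma foldCells (grid : List (List Int)) (v : Int) (hv1 : 1 ≤ v) (hv9 : v ≤ 9) :
    ∀ (L : List (Int × Int)) (t : PySem.Dict (Int × Int) Int),
      TInv grid (v + 1) t →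
      TInv grid (v + 1) (L.foldl (cellStep grid (grid.length : Int) (grid.headI.length : Int) v) t) ∧
      (∀ r c : Int, 0 ≤ r → r < (grid.length : Int) → 0 ≤ c → c < (grid.headI.length : Int) →
        pyCell grid r c = v →
        (t.get? (r, c) = some (dfsAval grid r c) ∨ (r, c) ∈ L) →
        (L.foldl (cellStep grid (grid.length : Int) (grid.headI.length : Int) v) t).get? (r, c) =
          some (dfsAval grid r c)) := by
  intro L
  induction L with
  | nil =>
    intro t hinv
    refine ⟨hinv, ?_⟩
    intro r c _ _ _ _ _ hmem
    simpa using hmem.resolve_right (by simp)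
  | cons p L ih =>
    intro t hinv
    -- the one-step dict
    have hstep_inv : TInv grid (v + 1) (cellStep grid (grid.length : Int) (grid.headI.length : Int) v t p) := by
      intro r c hr1 hr2 hc1 hc2 hge hle
      unfold cellStep
      by_cases hg : pyCell grid p.1 p.2 = v
      · rw [if_pos hg, PySem.Dict.get?_insert]
        rw [if_neg]
        · exact hinv r c hr1 hr2 hc1 hc2 hge hle
        · intro hkey
          rw [← hkey] at hg
          simp only at hg
          omega
      · rw [if_neg hg]
        exact hinv r c hr1 hr2 hc1 hc2 hge hle
    have hstep_keep : ∀ r c : Int,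
        t.get? (r, c) = some (dfsAval grid r c) →
        (cellStep grid (grid.length : Int) (grid.headI.length : Int) v t p).get? (r, c) =
          some (dfsAval grid r c) := by
      intro r c hold
      unfold cellStep
      by_cases hg : pyCell grid p.1 p.2 = v
      · rw [if_pos hg, PySem.Dict.get?_insert]
        by_cases hkey : ((r : Int), (c : Int)) = p
        · subst hkey
          have hg' : pyCell grid r c = v := hg
          rw [if_pos rfl]
          exact congrArg some (insert_val grid v t hv1 hv9 hinv r c hg')
        · rw [if_neg hkey]; exact hold
      · rw [if_neg hg]; exact hold
    obtain ⟨ih1, ih2⟩ := ih (cellStep grid (grid.length : Int) (grid.headI.length : Int) v t p) hstep_inv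
    refine ⟨ih1, ?_⟩
    intro r c hr1 hr2 hc1 hc2 hcell hmem
    simp only [List.foldl]
    apply ih2 r c hr1 hr2 hc1 hc2 hcell
    rcases hmem with hold | hmem
    · exact Or.inl (hstep_keep r c hold)
    · rcases List.mem_cons.mp hmem with heq | hmemL
      · left
        rw [← heq]
        unfold cellStep
        have hg' : pyCell grid ((r : Int), (c : Int)).1 ((r : Int), (c : Int)).2 = v := hcell
        rw [if_pos hg', PySem.Dict.get?_insert, if_pos rfl]
        exact congrArg some (insert_val grid v t hv1 hv9 hinv r c hcell)
      · exact Or.inr hmemL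

lemma levelCorrect (grid : List (List Int)) (v : Int) (hv1 : 1 ≤ v) (hv9 : v ≤ 9)
    (t : PySem.Dict (Int × Int) Int) (hinv : TInv grid (v + 1) t) :
    TInv grid v (bLevel grid (grid.length : Int) (grid.headI.length : Int) v t) := by
  rw [bLevel_eq_foldCells]
  obtain ⟨h1, h2⟩ := foldCells grid v hv1 hv9 (cells (grid.length : Int) (grid.headI.length : Int)) t hinv
  intro r c hr1 hr2 hc1 hc2 hge hle
  by_cases hcv : pyCell grid r c = v
  · apply h2 r c hr1 hr2 hc1 hc2 hcv
    right
    simp only [cells, List.mem_flatMap, List.mem_map, PySem.List.mem_pyRange_one]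
    exact ⟨r, ⟨hr1, hr2⟩, c, ⟨hc1, hc2⟩, rfl⟩
  · exact h1 r c hr1 hr2 hc1 hc2 (by omega) hle

-- the two ports agree on every input (the Lean ports are total; Pre_ is only needed for
-- faithfulness to the raising Pythons)
lemma ports_agree (start_x start_y : Int) (grid : List (List Int)) :
    count_paths_to_trailhead start_x start_y grid = count_paths_to_trailhead_alt start_x start_y grid := by
  have hr : PySem.List.pyRange 9 0 (-1) = [9, 8, 7, 6, 5, 4, 3, 2, 1] := by decide
  have h10 : TInv grid 10 PySem.Dict.empty := by
    intro r c _ _ _ _ hge hle; omega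
  have T1 : TInv grid 1
      ((PySem.List.pyRange 9 0 (-1)).foldl
        (fun t v => bLevel grid (grid.length : Int) (grid.headI.length : Int) v t) PySem.Dict.empty) := by
    rw [hr]
    simp only [List.foldl]
    apply levelCorrect grid 1 (by norm_num) (by norm_num)
    apply levelCorrect grid 2 (by norm_num) (by norm_num)
    apply levelCorrect grid 3 (by norm_num) (by norm_num)
    apply levelCorrect grid 4 (by norm_num) (by norm_num)
    apply levelCorrect grid 5 (by norm_num) (by norm_num)
    apply levelCorrect grid 6 (by norm_num) (by norm_num)
    apply levelCorrect grid 7 (by norm_num) (by norm_num)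
    apply levelCorrect grid 8 (by norm_num) (by norm_num)
    apply levelCorrect grid 9 (by norm_num) (by norm_num)
    exact fun r c h1 h2 h3 h4 hge hle => h10 r c h1 h2 h3 h4 (by omega) hle
  unfold count_paths_to_trailhead count_paths_to_trailhead_alt
  simp only []
  rw [show (10 : Nat) = 9 + 1 from rfl, dfsA_succ]
  by_cases h9 : pyCell grid start_x start_y = 9
  · rw [if_pos h9, if_pos h9]
  · rw [if_neg h9, if_neg h9]
    apply nbrSum grid _ start_x start_y 0 (fun p => dfsA grid 9 p.1 p.2 (pyCell grid p.1 p.2))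
    intro a b ha1 ha2 hb1 hb2 hcell
    simp only
    rw [hcell]
    have hg := T1 a b ha1 ha2 hb1 hb2 (by omega) (by omega)
    rw [PySem.Dict.getD_eq_get?_getD, hg]
    simp only [Option.getD_some]
    unfold dfsAval
    rw [hcell]
    exact dfsA_fuel_irrel grid 9 10 a b 1 hcell (by omega) (by omega) (by omega) (by omega)

-- ===== VERDICT (by name: the statement is the Claim_ definition above) =====
theorem count_paths_to_trailhead_spec : Claim_equal_count_paths_to_trailhead := by
  intro start_x start_y grid _ _
  unfold Spec_count_paths_to_trailhead
  exact ports_agree start_x start_y grid
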